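-- pv_equiv track=rewrite | github.com/alexjsmith0115/synapse | src/synapps/indexer/symbol_resolver.py | _build_class_lines_per_file
-- ===== SOURCE A (Python) =====
-- def _build_class_lines_per_file(
--     class_symbol_map: dict[tuple[str, int], str],
-- ) -> dict[str, list[tuple[int, str]]]:
--     """Group and sort class symbol positions by file for efficient enclosing-class lookup."""
--     per_file: dict[str, list[tuple[int, str]]] = {}
--     for (file_path, line), full_name in class_symbol_map.items():
--         per_file.setdefault(file_path, []).append((line, full_name))
--     for entries in per_file.values():
--         entries.sort()
--     return per_file
-- ===== SOURCE B (Python) =====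
-- def _build_class_lines_per_file(
--     class_symbol_map: dict[tuple[str, int], str],
-- ) -> dict[str, list[tuple[int, str]]]:
--     """Group and sort class symbol positions by file for efficient enclosing-class lookup."""
--     # Pre-seed the buckets in first-encounter order of file_path, then fill them
--     # from ONE global sort of all items by (line, full_name): each bucket comes
--     # out already sorted, so no per-bucket sort is needed.
--     per_file: dict[str, list[tuple[int, str]]] = {fp: [] for (fp, _line) in class_symbol_map}
--     for (fp, line), name in sorted(class_symbol_map.items(), key=lambda kv: (kv[0][1], kv[1])):
--         per_file[fp].append((line, name))
--     return per_file
-- ===== Notes on version B (the rewrite author's own statement) =====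
-- stated objective: alternative
-- what changed: Replaces the per-bucket sorts with one global sort of all items by (line, full_name) followed by a single grouping pass into buckets pre-seeded in first-encounter key order.
import Mathlib
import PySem

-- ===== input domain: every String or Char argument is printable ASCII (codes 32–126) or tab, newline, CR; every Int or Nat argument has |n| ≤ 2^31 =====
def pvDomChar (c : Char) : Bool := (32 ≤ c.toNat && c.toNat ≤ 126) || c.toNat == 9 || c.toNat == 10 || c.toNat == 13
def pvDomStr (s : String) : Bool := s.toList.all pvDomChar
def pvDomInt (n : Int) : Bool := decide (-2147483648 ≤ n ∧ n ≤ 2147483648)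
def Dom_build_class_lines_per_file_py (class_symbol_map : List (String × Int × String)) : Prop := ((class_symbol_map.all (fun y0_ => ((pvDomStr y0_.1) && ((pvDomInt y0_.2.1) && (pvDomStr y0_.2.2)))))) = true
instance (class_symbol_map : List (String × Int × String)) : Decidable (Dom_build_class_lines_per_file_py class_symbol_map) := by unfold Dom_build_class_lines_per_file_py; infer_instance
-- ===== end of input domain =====

-- B replaces A's group-then-sort-each-bucket with one global sort followed by a single
-- grouping pass into pre-seeded buckets (objective: alternative decomposition, same cost).

-- ===== PORT A =====
-- per_file.setdefault(fp, []).append((line, name))  =  Dict.modify fp [] (· ++ [(line, name)])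
-- (setdefault appends a fresh key at the end, then the list append — exactly Dict.modify).
def build_class_lines_per_file_py (class_symbol_map : List (String × Int × String)) : List (String × List (Int × String)) :=
  let per_file := class_symbol_map.foldl
    (fun d t => PySem.Dict.modify d t.1 [] (fun es => es ++ [t.2])) PySem.Dict.empty
  -- second loop: entries.sort() sorts the (line, name) tuples lexicographically, in place
  (per_file.items).map (fun p => (p.1, PySem.List.sorted2 p.2 (fun e => e.1) (fun e => e.2) false))

-- ===== PORT B =====
-- per_file[fp].append(...) is ported as Dict.modify with default [] — fp is always a key
-- of per_file (pre-seeded from the same map), so the default branch is never the result.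
def build_class_lines_per_file_py_alt (class_symbol_map : List (String × Int × String)) : List (String × List (Int × String)) :=
  let order := class_symbol_map.foldl
    (fun d t => PySem.Dict.insert d t.1 ([] : List (Int × String))) PySem.Dict.empty
  let sortedItems := PySem.List.sorted2 class_symbol_map (fun t => t.2.1) (fun t => t.2.2) false
  (sortedItems.foldl (fun d t => PySem.Dict.modify d t.1 [] (fun es => es ++ [t.2])) order).items

-- ===== PRECONDITION & SPEC =====
def Spec_build_class_lines_per_file_py (class_symbol_map : List (String × Int × String)) (out : List (String × List (Int × String))) : Prop := out = build_class_lines_per_file_py_alt class_symbol_map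
instance (class_symbol_map : List (String × Int × String)) (out : List (String × List (Int × String))) : Decidable (Spec_build_class_lines_per_file_py class_symbol_map out) := by unfold Spec_build_class_lines_per_file_py; infer_instance

-- ===== CLAIM (what is proved, stated in full; the proofs are below) =====
def Claim_equal_build_class_lines_per_file_py : Prop := ∀ (class_symbol_map : List (String × Int × String)), Dom_build_class_lines_per_file_py class_symbol_map → Spec_build_class_lines_per_file_py class_symbol_map (build_class_lines_per_file_py class_symbol_map)

-- ===== LEMMAS AND PROOFS =====

-- Python's tuple comparison key (k1 x, k2 x) is the lexicographic product order.
theorem pv_sorted2_eq_sorted_toLex {a : Type} (xs : List a) (k1 : a → Int) (k2 : a → String) :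
    PySem.List.sorted2 xs k1 k2 false
      = PySem.List.sorted xs (fun x => toLex (k1 x, k2 x)) false := by
  have hcmp : (fun x y => decide (k1 x < k1 y) || (!decide (k1 y < k1 x) && decide (k2 x < k2 y)))
      = (fun x y : a => decide (toLex (k1 x, k2 x) < toLex (k1 y, k2 y))) := by
    funext x y
    rcases lt_trichotomy (k1 x) (k1 y) with h | h | h
    · simp [Prod.Lex.lt_iff, h, lt_asymm h]
    · simp [Prod.Lex.lt_iff, h]
    · simp [Prod.Lex.lt_iff, h.ne', lt_asymm h]
      exact fun hle => absurd h (not_lt.mpr hle)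
  simp only [PySem.List.sorted_eq_foldl_insertBy, PySem.List.sorted2, ← hcmp,
    Bool.false_eq_true, if_false]

theorem pv_set_update_of_subset (s xs : List String) (h : ∀ x ∈ xs, x ∈ s) :
    PySem.Set.update s xs = s := by
  induction xs generalizing s with
  | nil => rfl
  | cons x t ih =>
    have hadd : PySem.Set.add s x = s := by
      simp [PySem.Set.add, PySem.Set.contains, h x (by simp)]
    show List.foldl PySem.Set.add s (x :: t) = s
    rw [List.foldl_cons, hadd]
    exact ih s (fun y hy => h y (by simp [hy]))

theorem pv_getD_seed_fold (m : List (String × Int × String)) (k : String) :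
    ((m.foldl (fun d t => PySem.Dict.insert d t.1 ([] : List (Int × String)))
        PySem.Dict.empty).getD k []) = [] := by
  suffices hgen : ∀ d : PySem.Dict String (List (Int × String)), d.getD k [] = [] →
      ((m.foldl (fun d t => PySem.Dict.insert d t.1 []) d).getD k []) = [] from
    hgen _ (PySem.Dict.getD_empty k [])
  induction m with
  | nil => intro d hd; simpa using hd
  | cons t m ih =>
    intro d hd
    refine ih _ ?_
    rw [PySem.Dict.getD_insert]
    split <;> simp [hd]

theorem pv_bucket_eq (m : List (String × Int × String)) (k : String) :
    PySem.List.sorted2 ((m.filter (fun t => t.1 == k)).map (·.2)) (fun e => e.1) (fun e => e.2) false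
      = ((PySem.List.sorted2 m (fun t => t.2.1) (fun t => t.2.2) false).filter
          (fun t => t.1 == k)).map (·.2) := by
  rw [pv_sorted2_eq_sorted_toLex, pv_sorted2_eq_sorted_toLex]
  refine PySem.List.eq_of_perm_of_pairwise_le_of_injective
    (fun e : Int × String => toLex (e.1, e.2)) (fun e e' he => ?_) ?_ ?_ ?_
  · cases e; cases e'
    simpa using congrArg ofLex he
  · -- both sides are permutations of (m.filter …).map (·.2)
    exact (PySem.List.sorted_perm _ _ false).trans
      ((((PySem.List.sorted_perm m (fun t => toLex (t.2.1, t.2.2)) false).filter _).map _).symm)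
  · exact PySem.List.sorted_pairwise _ _
  · have hp := PySem.List.sorted_pairwise m (fun t => toLex (t.2.1, t.2.2))
    exact List.pairwise_map.mpr (hp.filter _)

theorem pv_main (m : List (String × Int × String)) :
    build_class_lines_per_file_py m = build_class_lines_per_file_py_alt m := by
  show (List.map (fun p => (p.1, PySem.List.sorted2 p.2 (fun e => e.1) (fun e => e.2) false))
      (List.foldl (fun d t => PySem.Dict.modify d t.1 [] (fun es => es ++ [t.2]))
        PySem.Dict.empty m).items)
    = (List.foldl (fun d t => PySem.Dict.modify d t.1 [] (fun es => es ++ [t.2]))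
        (List.foldl (fun d t => PySem.Dict.insert d t.1 ([] : List (Int × String)))
          PySem.Dict.empty m)
        (PySem.List.sorted2 m (fun t => t.2.1) (fun t => t.2.2) false)).items
  set perA := m.foldl (fun d t => PySem.Dict.modify d t.1 [] (fun es => es ++ [t.2]))
    PySem.Dict.empty with hperA
  set order := m.foldl (fun d t => PySem.Dict.insert d t.1 ([] : List (Int × String)))
    PySem.Dict.empty with horder
  set sortedItems := PySem.List.sorted2 m (fun t => t.2.1) (fun t => t.2.2) false with hsi
  set final := sortedItems.foldl
    (fun d t => PySem.Dict.modify d t.1 [] (fun es => es ++ [t.2])) order with hfinal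
  have hKA : perA.keys = PySem.Set.ofList (m.map (·.1)) := by
    rw [hperA, PySem.Dict.keys_foldl_modify_key m (·.1) []
      (fun _ t => fun es => es ++ [t.2]) PySem.Dict.empty]
    rw [PySem.Set.ofList_eq_foldl]; rfl
  have hKO : order.keys = PySem.Set.ofList (m.map (·.1)) := by
    rw [horder, PySem.Dict.keys_foldl_insert_key m (·.1) (fun _ _ => []) PySem.Dict.empty]
    rw [PySem.Set.ofList_eq_foldl]; rfl
  have hKF : final.keys = PySem.Set.ofList (m.map (·.1)) := by
    rw [hfinal, PySem.Dict.keys_foldl_modify_key sortedItems (·.1) []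
      (fun _ t => fun es => es ++ [t.2]) order, hKO]
    refine pv_set_update_of_subset _ _ (fun x hx => ?_)
    rcases List.mem_map.mp hx with ⟨t, ht, rfl⟩
    exact (PySem.Set.mem_ofList _ _).mpr
      (List.mem_map.mpr ⟨t, (PySem.List.sorted2_perm m _ _ false).mem_iff.mp ht, rfl⟩)
  have hNA : perA.keys.Nodup := by
    rw [hperA]
    exact PySem.Dict.nodup_keys_foldl_modify_key m (·.1) []
      (fun _ t => fun es => es ++ [t.2]) PySem.Dict.empty (by simp [PySem.Dict.keys_empty])
  have hNO : order.keys.Nodup := by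
    rw [horder]
    exact PySem.Dict.nodup_keys_foldl_insert_key m (·.1) (fun _ _ => []) PySem.Dict.empty
      (by simp [PySem.Dict.keys_empty])
  have hNF : final.keys.Nodup := by
    rw [hfinal]
    exact PySem.Dict.nodup_keys_foldl_modify_key sortedItems (·.1) []
      (fun _ t => fun es => es ++ [t.2]) order hNO
  rw [PySem.Dict.items_eq_map_keys perA hNA [], PySem.Dict.items_eq_map_keys final hNF [],
    hKA, hKF, List.map_map]
  refine List.map_congr_left (fun k _ => ?_)
  have hA : perA.getD k [] = (m.filter (fun t => t.1 == k)).map (·.2) := by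
    rw [hperA, PySem.Dict.getD_foldl_modify_append m PySem.Dict.empty k,
      PySem.Dict.getD_empty, List.nil_append]
  have hF : final.getD k []
      = (sortedItems.filter (fun t => t.1 == k)).map (·.2) := by
    rw [hfinal, PySem.Dict.getD_foldl_modify_append sortedItems order k, horder,
      pv_getD_seed_fold, List.nil_append]
  simp only [Function.comp, hA, hF, hsi]
  exact congrArg (Prod.mk k) (pv_bucket_eq m k)

-- ===== VERDICT (by name: the statement is the Claim_ definition above) =====
theorem build_class_lines_per_file_py_spec : Claim_equal_build_class_lines_per_file_py := by
  intro m _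
  exact pv_main m
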